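-- pv_equiv track=rewrite | github.com/daniel-reich/turbo-robot | bdsWZ29zJfJ2Roymv_21.py | swap_two
-- ===== SOURCE A (Python) =====
-- def swap_two(txt):
--   lst = []
--   for i in range(0, len(txt), 2):
--     lst.append(txt[i:i+2])
--   for i in range(1, len(lst), 2):
--     if len(lst[i]) > 1:
--       x = lst[i]
--       y = lst[i-1]
--       lst[i] = y
--       lst[i-1] = x
--   return "".join(lst)
-- ===== SOURCE B (Python) =====
-- def swap_two(txt):
--   out = []
--   for i in range(0, len(txt), 4):
--     block = txt[i:i+4]
--     if len(block) == 4: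
--       out.append(block[2:] + block[:2])
--     else:
--       out.append(block)
--   return "".join(out)
-- ===== Notes on version B (the rewrite author's own statement) =====
-- stated objective: simpler
-- what changed: Single pass over the string in 4-char blocks, swapping each full block's halves in place of A's two-pass build-chunk-list-then-swap-adjacent-chunks approach.
import Mathlib
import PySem

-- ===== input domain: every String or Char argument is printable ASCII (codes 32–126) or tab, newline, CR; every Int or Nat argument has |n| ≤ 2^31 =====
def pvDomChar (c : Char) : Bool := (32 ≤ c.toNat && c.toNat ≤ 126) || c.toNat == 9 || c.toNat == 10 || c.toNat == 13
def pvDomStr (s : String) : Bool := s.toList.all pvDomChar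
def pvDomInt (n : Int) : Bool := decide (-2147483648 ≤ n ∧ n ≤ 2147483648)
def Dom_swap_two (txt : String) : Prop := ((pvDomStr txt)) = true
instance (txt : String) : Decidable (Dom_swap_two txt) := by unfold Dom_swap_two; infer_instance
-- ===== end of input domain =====

-- B swaps the halves of each full 4-character block in one pass, instead of A's
-- two passes (build a list of 2-character chunks, then swap adjacent chunks): simpler.

-- ===== PORT A =====
def swap_two (txt : String) : String :=
  let cs := txt.toList
  let lst := List.foldl
    (fun lst i => lst ++ [PySem.Chars.slice cs (some i) (some (i + 2))]) []
    (PySem.List.pyRange 0 (PySem.Chars.len cs) 2)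
  let lst2 := List.foldl
    (fun lst i =>
      if 1 < PySem.Chars.len (PySem.List.pyGetD lst i []) then
        let x := PySem.List.pyGetD lst i []
        let y := PySem.List.pyGetD lst (i - 1) []
        PySem.List.pySetD (PySem.List.pySetD lst i y) (i - 1) x
      else lst) lst
    (PySem.List.pyRange 1 (PySem.List.len lst) 2)
  String.ofList (PySem.Chars.join [] lst2)

-- ===== PORT B =====
def swap_two_alt (txt : String) : String :=
  let cs := txt.toList
  let out := List.foldl
    (fun out i =>
      let block := PySem.Chars.slice cs (some i) (some (i + 4))
      let piece := if PySem.Chars.len block = 4 then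
          PySem.Chars.slice block (some 2) none ++ PySem.Chars.slice block none (some 2)
        else block
      out ++ [piece]) []
    (PySem.List.pyRange 0 (PySem.Chars.len cs) 4)
  String.ofList (PySem.Chars.join [] out)

-- ===== PRECONDITION & SPEC =====
def Spec_swap_two (txt : String) (out : String) : Prop := out = swap_two_alt txt
instance (txt : String) (out : String) : Decidable (Spec_swap_two txt out) := by unfold Spec_swap_two; infer_instance

-- ===== CLAIM (what is proved, stated in full; the proofs are below) =====
def Claim_equal_swap_two : Prop := ∀ (txt : String), Dom_swap_two txt → Spec_swap_two txt (swap_two txt)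

-- ===== LEMMAS AND PROOFS =====
def chunk2 : List Char → List (List Char)
  | [] => []
  | a :: r => (a :: r).take 2 :: chunk2 (r.drop 1)
termination_by l => l.length
decreasing_by simp

lemma pyRange_cons_of_pos (a b s : Int) (hs : 0 < s) (hab : a < b) :
    PySem.List.pyRange a b s = a :: PySem.List.pyRange (a + s) b s := by
  rw [PySem.List.pyRange_of_pos _ _ hs, PySem.List.pyRange_of_pos _ _ hs, if_pos hab]
  have hN : (b - a + s - 1) / s = (b - a - 1) / s + 1 := by
    have h1 : b - a + s - 1 = (b - a - 1) + 1 * s := by ring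
    rw [h1, Int.add_mul_ediv_right _ _ (by omega)]
  have hq : 0 ≤ (b - a - 1) / s := Int.ediv_nonneg (by omega) (by omega)
  by_cases h2 : a + s < b
  · have hN' : (b - (a + s) + s - 1) / s = (b - a - 1) / s := by ring_nf
    have ht : ((b - a - 1) / s + 1).toNat = ((b - a - 1) / s).toNat + 1 := by omega
    rw [if_pos h2, hN', hN, ht, List.range_succ_eq_map, List.map_cons, List.map_map]
    refine congrArg₂ _ (by simp) (List.map_congr_left fun k _ => ?_)
    simp [Function.comp]
    ring
  · have h0 : (b - a - 1) / s = 0 := Int.ediv_eq_zero_of_lt (by omega) (by omega)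
    rw [if_neg h2, hN, h0]
    simp

lemma pyRange_nil_of_le (a b s : Int) (hs : 0 < s) (hab : b ≤ a) :
    PySem.List.pyRange a b s = [] := by
  rw [PySem.List.pyRange_of_pos _ _ hs, if_neg (by omega)]
  simp

lemma join_nil_eq_flatten (l : List (List Char)) : PySem.Chars.join [] l = l.flatten := by
  induction l with
  | nil => simp [PySem.Chars.join_nil]
  | cons p rest ih =>
    cases rest with
    | nil => simp [PySem.Chars.join_singleton]
    | cons q r => rw [PySem.Chars.join_cons_cons]; simp_all

lemma chunkA (cs : List Char) (k : Nat) :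
    (PySem.List.pyRange (k : Int) (cs.length : Int) 2).map
      (fun i => PySem.Chars.slice cs (some i) (some (i + 2))) = chunk2 (cs.drop k) := by
  induction hn : cs.length - k using Nat.strongRecOn generalizing k with
  | _ n ih =>
  by_cases hk : k < cs.length
  case neg =>
    rw [pyRange_nil_of_le _ _ _ (by omega) (by exact_mod_cast by omega)]
    have : cs.drop k = [] := List.drop_eq_nil_of_le (by omega)
    simp [this, chunk2]
  case pos =>
    rw [pyRange_cons_of_pos _ _ _ (by omega) (by exact_mod_cast hk), List.map_cons]
    rw [show ((k:Int) + 2) = ((k + 2 : Nat) : Int) by push_cast; ring]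
    have hsl : PySem.Chars.slice cs (some (k:Int)) (some ((k + 2 : Nat):Int)) = (cs.drop k).take 2 := by
      rw [PySem.Chars.slice_eq_listSlice, PySem.List.slice_natCast]
      norm_num
    rw [hsl, ih (cs.length - (k+2)) (by omega) (k+2) rfl]
    have hne : cs.drop k ≠ [] := by
      intro h; have := List.drop_eq_nil_iff.mp h; omega
    obtain ⟨a, r, hr⟩ := List.exists_cons_of_ne_nil hne
    rw [hr]
    have hdd : cs.drop (k+2) = (a :: r).drop 2 := by
      rw [← hr, List.drop_drop, Nat.add_comm]
    rw [hdd]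
    simp [chunk2]

def blocksB : List Char → List (List Char)
  | [] => []
  | a :: r =>
      (if ((a :: r).take 4).length = 4
        then ((a :: r).take 4).drop 2 ++ ((a :: r).take 4).take 2
        else (a :: r).take 4) :: blocksB (r.drop 3)
termination_by l => l.length
decreasing_by simp

lemma Bmap (cs : List Char) (k : Nat) :
    (PySem.List.pyRange (k : Int) (cs.length : Int) 4).map
      (fun i =>
        let block := PySem.Chars.slice cs (some i) (some (i + 4))
        if PySem.Chars.len block = 4 then
          PySem.Chars.slice block (some 2) none ++ PySem.Chars.slice block none (some 2)
        else block) = blocksB (cs.drop k) := by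
  induction hn : cs.length - k using Nat.strongRecOn generalizing k with
  | _ n ih =>
  by_cases hk : k < cs.length
  case neg =>
    rw [pyRange_nil_of_le _ _ _ (by omega) (by exact_mod_cast by omega)]
    have : cs.drop k = [] := List.drop_eq_nil_of_le (by omega)
    simp [this, blocksB]
  case pos =>
    rw [pyRange_cons_of_pos _ _ _ (by omega) (by exact_mod_cast hk), List.map_cons]
    rw [show ((k:Int) + 4) = ((k + 4 : Nat) : Int) by push_cast; ring]
    have hsl : PySem.Chars.slice cs (some (k:Int)) (some ((k + 4 : Nat):Int)) = (cs.drop k).take 4 := by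
      rw [PySem.Chars.slice_eq_listSlice, PySem.List.slice_natCast]
      norm_num
    simp only [hsl]
    rw [ih (cs.length - (k+4)) (by omega) (k+4) rfl]
    have hne : cs.drop k ≠ [] := by
      intro h; have := List.drop_eq_nil_iff.mp h; omega
    obtain ⟨a, r, hr⟩ := List.exists_cons_of_ne_nil hne
    have hdd : cs.drop (k+4) = r.drop 3 := by
      have h1 : (cs.drop k).drop 4 = cs.drop (k+4) := by rw [List.drop_drop, Nat.add_comm]
      rw [← h1, hr]
      simp
    rw [hdd, hr, blocksB]
    have hlen : PySem.Chars.len (((a :: r)).take 4) = (((a :: r).take 4).length : Int) := by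
      simp [PySem.Chars.len_eq]
    by_cases h4 : ((a :: r).take 4).length = 4
    · rw [if_pos (by rw [hlen]; exact_mod_cast h4), if_pos h4]
      simp [pysem]
    · rw [if_neg (by rw [hlen]; exact_mod_cast h4), if_neg h4]

def swapPairs : List (List Char) → List (List Char)
  | x :: y :: r => if 1 < y.length then y :: x :: swapPairs r else x :: y :: swapPairs r
  | l => l

lemma swF (l pre : List (List Char)) :
    List.foldl
      (fun lst i =>
        if 1 < PySem.Chars.len (PySem.List.pyGetD lst i []) then
          let x := PySem.List.pyGetD lst i []
          let y := PySem.List.pyGetD lst (i - 1) []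
          PySem.List.pySetD (PySem.List.pySetD lst i y) (i - 1) x
        else lst) (pre ++ l)
      (PySem.List.pyRange ((pre.length : Int) + 1) ((pre.length : Int) + (l.length : Int)) 2)
      = pre ++ swapPairs l := by
  induction l using swapPairs.induct generalizing pre with
  | case1 x y r hy ih =>
    rw [pyRange_cons_of_pos _ _ _ (by norm_num) (by simp), List.foldl_cons]
    have e1 : ((pre.length : Int) + 1) = ((pre.length + 1 : Nat) : Int) := by push_cast; ring
    have hg1 : PySem.List.pyGetD (pre ++ x :: y :: r) ((pre.length : Int) + 1) [] = y := by
      rw [e1, PySem.List.pyGetD_natCast]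
      simp [List.getD]
    have hg0 : PySem.List.pyGetD (pre ++ x :: y :: r) ((pre.length : Int) + 1 - 1) [] = x := by
      rw [show ((pre.length : Int) + 1 - 1) = ((pre.length : Nat) : Int) by ring, PySem.List.pyGetD_natCast]
      simp [List.getD]
    have hlen : PySem.Chars.len y = (y.length : Int) := by simp [PySem.Chars.len_eq]
    have hset : PySem.List.pySetD (pre ++ x :: y :: r) ((pre.length : Int) + 1) x
        = pre ++ x :: x :: r := by
      rw [e1, PySem.List.pySetD_natCast]
      simp
    have hset0 : ∀ v w, PySem.List.pySetD (pre ++ x :: v :: r) ((pre.length : Int) + 1 - 1) w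
        = pre ++ w :: v :: r := by
      intro v w
      rw [show ((pre.length : Int) + 1 - 1) = ((pre.length : Nat) : Int) by ring, PySem.List.pySetD_natCast]
      simp
    simp only [hg1, hg0, hlen, if_pos (show (1:Int) < (y.length : Int) by exact_mod_cast hy), hset, hset0]
    have hsp : pre ++ y :: x :: r = (pre ++ [y, x]) ++ r := by simp
    rw [hsp]
    have harith : (((pre ++ [y, x]).length : Int) + 1) = (pre.length : Int) + 1 + 2 := by
      simp; ring
    have harith2 : (((pre ++ [y, x]).length : Int) + (r.length : Int))
        = (pre.length : Int) + ((x :: y :: r).length : Int) := by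
      simp; ring
    rw [← harith, ← harith2, ih]
    simp [swapPairs, hy]
  | case2 x y r hy ih =>
    rw [pyRange_cons_of_pos _ _ _ (by norm_num) (by simp), List.foldl_cons]
    have e1 : ((pre.length : Int) + 1) = ((pre.length + 1 : Nat) : Int) := by push_cast; ring
    have hg1 : PySem.List.pyGetD (pre ++ x :: y :: r) ((pre.length : Int) + 1) [] = y := by
      rw [e1, PySem.List.pyGetD_natCast]
      simp [List.getD]
    have hlen : PySem.Chars.len y = (y.length : Int) := by simp [PySem.Chars.len_eq]
    simp only [hg1, hlen, if_neg (show ¬ (1:Int) < (y.length : Int) by exact_mod_cast hy)]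
    have hsp : pre ++ x :: y :: r = (pre ++ [x, y]) ++ r := by simp
    rw [hsp]
    have harith : (((pre ++ [x, y]).length : Int) + 1) = (pre.length : Int) + 1 + 2 := by
      simp; ring
    have harith2 : (((pre ++ [x, y]).length : Int) + (r.length : Int))
        = (pre.length : Int) + ((x :: y :: r).length : Int) := by
      simp; ring
    rw [← harith, ← harith2, ih]
    simp [swapPairs, hy]
  | case3 l h =>
    have hl : l.length ≤ 1 := by
      cases l with
      | nil => simp
      | cons a t => cases t with
        | nil => simp
        | cons b u => exact absurd rfl (h a b u)
    rw [pyRange_nil_of_le _ _ _ (by norm_num) (by omega), List.foldl_nil]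
    cases l with
    | nil => simp [swapPairs]
    | cons a t =>
      cases t with
      | nil => simp [swapPairs]
      | cons b u => simp at hl

def goB : List Char → List Char
  | a :: b :: c :: d :: r => c :: d :: a :: b :: goB r
  | l => l

lemma flatten_eq (cs : List Char) :
    (swapPairs (chunk2 cs)).flatten = (blocksB cs).flatten := by
  induction cs using goB.induct with
  | case1 a b c d r ih =>
    have h1 : chunk2 (a :: b :: c :: d :: r) = [a, b] :: [c, d] :: chunk2 r := by
      rw [chunk2]
      simp
      rw [chunk2]
      simp
    rw [h1, swapPairs, if_pos (by simp), blocksB]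
    cases r with
    | nil => simp [ih]
    | cons e t => simp [ih]
  | case2 l h =>
    rcases l with _ | ⟨a, _ | ⟨b, _ | ⟨c, _ | ⟨d, r⟩⟩⟩⟩
    · simp [chunk2, swapPairs, blocksB]
    · simp [chunk2, swapPairs, blocksB]
    · simp [chunk2, swapPairs, blocksB]
    · simp [chunk2, swapPairs, blocksB]
    · exact absurd rfl (h a b c d r)

-- ===== VERDICT (by name: the statement is the Claim_ definition above) =====
theorem swap_two_spec : Claim_equal_swap_two := by
  intro txt _
  unfold Spec_swap_two swap_two swap_two_alt
  have hchunk := chunkA txt.toList 0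
  have hblocks := Bmap txt.toList 0
  simp only [Nat.cast_zero, List.drop_zero] at hchunk hblocks
  have hsw := swF (chunk2 txt.toList) []
  simp only [List.nil_append, List.length_nil, Nat.cast_zero, zero_add,
    PySem.Chars.len_eq] at hsw
  simp only [PySem.Chars.len_eq, PySem.List.len_eq,
    PySem.List.foldl_append_singleton_eq_map, List.nil_append]
  simp only [PySem.Chars.len_eq] at hblocks
  rw [hchunk, hsw, hblocks, join_nil_eq_flatten, join_nil_eq_flatten, flatten_eq]
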